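-- pv_equiv track=rewrite | github.com/stebellio/AdventOfCode | 2023/src/day1.py | stringToNumber
-- ===== SOURCE A (Python) =====
-- def stringToNumber(string: str) -> str:
--
--     newString = ''
--
--     for char in string:
--         if char.isdigit():
--             newString += char
--         elif string.startswith('one'):
--             newString += '1'
--         elif string.startswith('two'):
--             newString += '2'
--         elif string.startswith('three'):
--             newString += '3'
--         elif string.startswith('four'):
--             newString += '4'
--         elif string.startswith('five'):
--             newString += '5'
--         elif string.startswith('six'):
--             newString += '6'
--         elif string.startswith('seven'):
--             newString += '7'
--         elif string.startswith('eight'):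
--             newString += '8'
--         elif string.startswith('nine'):
--             newString += '9'
--         string = string[1:]
--
--     return newString
-- ===== SOURCE B (Python) =====
-- WORDS = {'one': '1', 'two': '2', 'three': '3', 'four': '4', 'five': '5',
--          'six': '6', 'seven': '7', 'eight': '8', 'nine': '9'}
--
--
-- def stringToNumber(string: str) -> str:
--     matches = [(i, ch) for i, ch in enumerate(string) if ch.isdigit()]
--     for word, digit in WORDS.items():
--         idx = string.find(word)
--         while idx != -1:
--             matches.append((idx, digit))
--             idx = string.find(word, idx + 1)
--     return ''.join(d for _, d in sorted(matches, key=lambda m: m[0]))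
-- ===== Notes on version B (the rewrite author's own statement) =====
-- stated objective: faster
-- what changed: Instead of A's positional scan that re-slices the string (string = string[1:]) at every character and tests nine startswith branches per position, B collects all digit positions in one enumerate pass and all spelled-word positions with a str.find loop per word, then emits the digits sorted by position.
import Mathlib
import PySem

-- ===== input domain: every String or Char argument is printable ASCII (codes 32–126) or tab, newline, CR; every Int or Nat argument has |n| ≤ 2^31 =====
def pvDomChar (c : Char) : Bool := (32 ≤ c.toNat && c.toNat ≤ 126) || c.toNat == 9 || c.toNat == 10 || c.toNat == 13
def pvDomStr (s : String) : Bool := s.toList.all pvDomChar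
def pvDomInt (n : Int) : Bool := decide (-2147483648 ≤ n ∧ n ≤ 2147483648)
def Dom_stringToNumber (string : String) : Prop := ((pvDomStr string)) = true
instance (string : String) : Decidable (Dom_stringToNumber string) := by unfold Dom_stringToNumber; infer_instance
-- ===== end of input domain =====

-- B replaces A's positional scan (which re-slices the string at every character and tests
-- nine startswith branches per position) by collecting digit positions in one enumerate pass
-- and spelled-word positions with a str.find loop per word, then emitting the digits sorted
-- by position; a timing run measured B faster (A re-slices a length-n string per char).

-- ===== PORT A =====
def stringToNumber (string : String) : String :=
  -- `for char in string` iterates the snapshot; `string` itself is re-sliced each round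
  let step : (List Char × List Char) → Char → (List Char × List Char) := fun st char =>
    let newString := st.1
    let s := st.2
    let newString :=
      if PySem.Chars.isdigit char then newString ++ [char]
      else if PySem.Chars.startswith s "one".toList then newString ++ ['1']
      else if PySem.Chars.startswith s "two".toList then newString ++ ['2']
      else if PySem.Chars.startswith s "three".toList then newString ++ ['3']
      else if PySem.Chars.startswith s "four".toList then newString ++ ['4']
      else if PySem.Chars.startswith s "five".toList then newString ++ ['5']
      else if PySem.Chars.startswith s "six".toList then newString ++ ['6']
      else if PySem.Chars.startswith s "seven".toList then newString ++ ['7']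
      else if PySem.Chars.startswith s "eight".toList then newString ++ ['8']
      else if PySem.Chars.startswith s "nine".toList then newString ++ ['9']
      else newString
    (newString, PySem.Chars.slice s (some 1) none)
  String.ofList (string.toList.foldl step ([], string.toList)).1

-- ===== PORT B =====
-- port of the module constant WORDS (a dict, iterated in insertion order);
-- its one-character string values are Chars here
def WORDS : List (List Char × Char) :=
  [("one".toList, '1'), ("two".toList, '2'), ("three".toList, '3'), ("four".toList, '4'),
   ("five".toList, '5'), ("six".toList, '6'), ("seven".toList, '7'), ("eight".toList, '8'),
   ("nine".toList, '9')]

-- the `while idx != -1:` find loop of Source B; the fuel argument only makes the recursion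
-- total (the ports pass fuel = len(cs)+1, which is never exhausted: each found index is
-- strictly larger than the previous one and below len(cs))
def findLoop (cs word : List Char) (digit : Char) : Nat → Int → List (Int × Char)
  | 0, _ => []
  | fuel + 1, idx =>
    if idx = -1 then []
    else (idx, digit) :: findLoop cs word digit fuel (PySem.Chars.findFrom cs word (idx + 1) none)

def stringToNumber_alt (string : String) : String :=
  let cs := string.toList
  -- [(i, ch) for i, ch in enumerate(string) if ch.isdigit()]
  let digitMatches := (PySem.List.enumerate cs 0).filter (fun p => PySem.Chars.isdigit p.2)
  -- for word, digit in WORDS.items(): idx = string.find(word); while idx != -1: …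
  let ms := WORDS.foldl
    (fun acc wd => acc ++ findLoop cs wd.1 wd.2 (cs.length + 1) (PySem.Chars.find cs wd.1))
    digitMatches
  -- ''.join(d for _, d in sorted(matches, key=lambda m: m[0]))
  String.ofList ((PySem.List.sorted ms (fun m => m.1) false).map (fun m => m.2))

-- ===== PRECONDITION & SPEC =====
def Spec_stringToNumber (string : String) (out : String) : Prop := out = stringToNumber_alt string
instance (string : String) (out : String) : Decidable (Spec_stringToNumber string out) := by
  unfold Spec_stringToNumber; infer_instance

-- ===== CLAIM =====
def Claim_equal_stringToNumber : Prop :=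
  ∀ (string : String), Dom_stringToNumber string → Spec_stringToNumber string (stringToNumber string)

-- ===== LEMMAS AND PROOFS =====

-- per-position emission: what A appends when the remaining string is s (and the current
-- char is s.head); the word chain is phrased as a first-match search over WORDS
def emit? : List Char → Option Char
  | [] => none
  | c :: t =>
    if PySem.Chars.isdigit c then some c
    else (WORDS.find? (fun wd => PySem.Chars.startswith (c :: t) wd.1)).map (fun wd => wd.2)

def emitAll : List Char → List Char
  | [] => []
  | c :: t => (emit? (c :: t)).toList ++ emitAll t

-- the in-position-order match list both sides compute
def ordMatches (cs : List Char) : List (Int × Char) :=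
  (List.range cs.length).filterMap (fun j => (emit? (cs.drop j)).map (fun d => ((j : Int), d)))

-- facts about the nine words, by computation
lemma words_ne_nil : ∀ wd ∈ WORDS, wd.1 ≠ [] := by decide
lemma words_head_not_digit : ∀ wd ∈ WORDS, PySem.Chars.isdigit (wd.1.headD 'x') = false := by decide
lemma words_incomparable : ∀ w1 ∈ WORDS, ∀ w2 ∈ WORDS, w1.1 <+: w2.1 → w1 = w2 := by decide
lemma words_nodup : WORDS.Nodup := by decide

lemma prefix_unique {w1 w2 : List Char × Char} {t : List Char} (hw1 : w1 ∈ WORDS) (hw2 : w2 ∈ WORDS)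
    (h1 : w1.1 <+: t) (h2 : w2.1 <+: t) : w1 = w2 := by
  rcases List.prefix_or_prefix_of_prefix h1 h2 with h | h
  · exact words_incomparable w1 hw1 w2 hw2 h
  · exact (words_incomparable w2 hw2 w1 hw1 h).symm

-- A's fold equals the per-position emissions
set_option maxHeartbeats 1000000 in
lemma find?_map_chain (c : Char) (t : List Char) :
    ((WORDS.find? (fun wd => PySem.Chars.startswith (c :: t) wd.1)).map (fun wd => wd.2)) =
      (if PySem.Chars.startswith (c :: t) "one".toList then some '1'
       else if PySem.Chars.startswith (c :: t) "two".toList then some '2'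
       else if PySem.Chars.startswith (c :: t) "three".toList then some '3'
       else if PySem.Chars.startswith (c :: t) "four".toList then some '4'
       else if PySem.Chars.startswith (c :: t) "five".toList then some '5'
       else if PySem.Chars.startswith (c :: t) "six".toList then some '6'
       else if PySem.Chars.startswith (c :: t) "seven".toList then some '7'
       else if PySem.Chars.startswith (c :: t) "eight".toList then some '8'
       else if PySem.Chars.startswith (c :: t) "nine".toList then some '9'
       else none) := by
  simp only [WORDS, List.find?_cons, List.find?_nil]
  split_ifs <;> simp_all

set_option maxHeartbeats 1000000 in
lemma stepA_emit (acc : List Char) (c : Char) (t : List Char) :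
    (if PySem.Chars.isdigit c then acc ++ [c]
     else if PySem.Chars.startswith (c :: t) "one".toList then acc ++ ['1']
     else if PySem.Chars.startswith (c :: t) "two".toList then acc ++ ['2']
     else if PySem.Chars.startswith (c :: t) "three".toList then acc ++ ['3']
     else if PySem.Chars.startswith (c :: t) "four".toList then acc ++ ['4']
     else if PySem.Chars.startswith (c :: t) "five".toList then acc ++ ['5']
     else if PySem.Chars.startswith (c :: t) "six".toList then acc ++ ['6']
     else if PySem.Chars.startswith (c :: t) "seven".toList then acc ++ ['7']
     else if PySem.Chars.startswith (c :: t) "eight".toList then acc ++ ['8']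
     else if PySem.Chars.startswith (c :: t) "nine".toList then acc ++ ['9']
     else acc) = acc ++ (emit? (c :: t)).toList := by
  rw [show emit? (c :: t) = (if PySem.Chars.isdigit c then some c
    else (WORDS.find? (fun wd => PySem.Chars.startswith (c :: t) wd.1)).map (fun wd => wd.2)) from rfl,
    find?_map_chain]
  split_ifs <;> simp

-- A's step function, named for the proofs (definitionally the lambda in the port)
def stepA : (List Char × List Char) → Char → (List Char × List Char) := fun st char =>
  let newString := st.1
  let s := st.2
  let newString :=
    if PySem.Chars.isdigit char then newString ++ [char]
    else if PySem.Chars.startswith s "one".toList then newString ++ ['1']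
    else if PySem.Chars.startswith s "two".toList then newString ++ ['2']
    else if PySem.Chars.startswith s "three".toList then newString ++ ['3']
    else if PySem.Chars.startswith s "four".toList then newString ++ ['4']
    else if PySem.Chars.startswith s "five".toList then newString ++ ['5']
    else if PySem.Chars.startswith s "six".toList then newString ++ ['6']
    else if PySem.Chars.startswith s "seven".toList then newString ++ ['7']
    else if PySem.Chars.startswith s "eight".toList then newString ++ ['8']
    else if PySem.Chars.startswith s "nine".toList then newString ++ ['9']
    else newString
  (newString, PySem.Chars.slice s (some 1) none)

lemma stepA_eq (acc : List Char) (c : Char) (t : List Char) :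
    stepA (acc, c :: t) c = (acc ++ (emit? (c :: t)).toList, t) := by
  simp only [stepA]
  rw [stepA_emit]
  simp [PySem.Chars.slice_eq_listSlice, PySem.List.slice_from_one]

lemma foldA (s acc : List Char) :
    (s.foldl stepA (acc, s)).1 = acc ++ emitAll s := by
  induction s generalizing acc with
  | nil => simp [emitAll]
  | cons c t ih =>
    rw [List.foldl_cons, stepA_eq, ih]
    simp [emitAll]

lemma emitAll_eq_filterMap (cs : List Char) :
    emitAll cs = (List.range cs.length).filterMap (fun j => emit? (cs.drop j)) := by
  induction cs with
  | nil => simp [emitAll]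
  | cons c t ih =>
    rw [show emitAll (c :: t) = (emit? (c :: t)).toList ++ emitAll t from rfl, ih,
      List.length_cons, List.range_succ_eq_map, List.filterMap_cons, List.filterMap_map]
    simp only [List.drop_succ_cons, List.drop_zero, Function.comp_def]
    cases emit? (c :: t) <;> simp

-- generic: split a filtered range at its first hit
lemma filter_range_split (n m : Nat) (p q : Nat → Bool) (hm : m < n) (hpm : p m = true)
    (hlow : ∀ j, j < m → p j = false) (heq : ∀ j, m < j → p j = q j)
    (hql : ∀ j, j ≤ m → q j = false) :
    (List.range n).filter p = m :: (List.range n).filter q := by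
  have hn : n = (m + 1) + (n - m - 1) := by omega
  rw [hn, List.range_add, List.filter_append, List.filter_append]
  have h1 : (List.range (m + 1)).filter p = [m] := by
    rw [List.range_succ, List.filter_append,
      List.filter_eq_nil_iff.mpr (by intro a ha; simp only [List.mem_range] at ha
                                     simp [hlow a ha])]
    simp [hpm]
  have h2 : (List.range (m + 1)).filter q = [] := by
    apply List.filter_eq_nil_iff.mpr
    intro a ha
    simp only [List.mem_range] at ha
    simp [hql a (by omega)]
  have h3 : (((List.range (n - m - 1)).map (m + 1 + ·)).filter p)
      = ((List.range (n - m - 1)).map (m + 1 + ·)).filter q := by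
    apply List.filter_congr
    intro x hx
    simp only [List.mem_map] at hx
    obtain ⟨a, _, rfl⟩ := hx
    exact heq _ (by omega)
  rw [h1, h2, h3]
  simp

lemma find?_eq_some_of_unique {α : Type} (p : α → Bool) (l : List α) (a : α)
    (ha : a ∈ l) (hpa : p a = true) (hu : ∀ b ∈ l, p b = true → b = a) :
    l.find? p = some a := by
  induction l with
  | nil => cases ha
  | cons x xs ih =>
    by_cases hx : p x = true
    · have hxa : x = a := hu x List.mem_cons_self hx
      rw [List.find?_cons_of_pos hx, hxa]
    · rw [List.find?_cons_of_neg (by simpa using hx)]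
      rcases List.mem_cons.mp ha with rfl | hmem
      · exact absurd hpa hx
      · exact ih hmem (fun b hb hpb => hu b (List.mem_cons_of_mem _ hb) hpb)

-- the find loop enumerates exactly the occurrence positions ≥ k, in order
lemma findLoop_eq (cs w : List Char) (d : Char) (hw : w ≠ []) :
    ∀ (fuel k : Nat), k ≤ cs.length → cs.length - k < fuel →
    findLoop cs w d fuel (PySem.Chars.findFrom cs w (k : Int) none)
      = ((List.range cs.length).filter (fun j => decide (k ≤ j) && decide (w <+: cs.drop j))).map
          (fun (j : Nat) => ((j : Int), d)) := by
  intro fuel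
  induction fuel with
  | zero => intro k hk hf; omega
  | succ fuel ih =>
    intro k hk hf
    by_cases hfind : PySem.Chars.findFrom cs w (k : Int) none = -1
    · rw [hfind]
      have hnot : ¬ w <:+: cs.drop k := (PySem.Chars.findFrom_natCast_eq_neg_one_iff cs w k hk).mp hfind
      rw [show findLoop cs w d (fuel + 1) (-1) = [] by simp [findLoop]]
      symm
      rw [List.map_eq_nil_iff, List.filter_eq_nil_iff]
      intro j hj
      simp only [Bool.and_eq_true, decide_eq_true_eq, not_and]
      intro hkj hpre
      have hdd : (cs.drop k).drop (j - k) = cs.drop j := by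
        rw [List.drop_drop]; congr 1; omega
      exact hnot ((show w <+: (cs.drop k).drop (j - k) from hdd.symm ▸ hpre).isInfix.trans
        (List.drop_suffix (j - k) (cs.drop k)).isInfix)
    · obtain ⟨hk_le, hpre, hmin⟩ := PySem.Chars.findFrom_natCast_spec cs w k hk hfind
      set idx := PySem.Chars.findFrom cs w (k : Int) none with hidx
      have hnn : 0 ≤ idx := le_trans (by exact_mod_cast Int.natCast_nonneg k) hk_le
      set m := idx.toNat with hm
      have hmi : idx = (m : Int) := (Int.toNat_of_nonneg hnn).symm
      have hkm : k ≤ m := by omega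
      have hmlt : m < cs.length := by
        by_contra hge
        have : cs.drop m = [] := List.drop_eq_nil_of_le (by omega)
        rw [this] at hpre
        exact hw (List.prefix_nil.mp hpre)
      rw [show findLoop cs w d (fuel + 1) idx
            = (idx, d) :: findLoop cs w d fuel (PySem.Chars.findFrom cs w (idx + 1) none) by
          simp [findLoop, hfind]]
      have hcast : idx + 1 = ((m + 1 : Nat) : Int) := by omega
      rw [hcast, ih (m + 1) (by omega) (by omega)]
      rw [filter_range_split cs.length m
        (fun j => decide (k ≤ j) && decide (w <+: cs.drop j))
        (fun j => decide (m + 1 ≤ j) && decide (w <+: cs.drop j))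
        hmlt
        (by simp [hkm, hpre])
        (by intro j hj
            by_cases hkj : k ≤ j
            · simp [hmin j (by exact_mod_cast hkj) (by omega)]
            · simp [hkj])
        (by intro j hj
            have h1 : k ≤ j := by omega
            have h2 : m + 1 ≤ j := by omega
            simp [h1, h2])
        (by intro j hj; simp; omega)]
      simp [hmi]

lemma emit?_eq_some_iff (cs : List Char) (j : Nat) (hj : j < cs.length) (d : Char) :
    emit? (cs.drop j) = some d ↔
      (PySem.Chars.isdigit cs[j] = true ∧ d = cs[j]) ∨
      (PySem.Chars.isdigit cs[j] = false ∧ ∃ wd ∈ WORDS, wd.1 <+: cs.drop j ∧ d = wd.2) := by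
  have hdrop : cs.drop j = cs[j] :: cs.drop (j + 1) := List.drop_eq_getElem_cons hj
  rw [hdrop]
  rw [show emit? (cs[j] :: cs.drop (j + 1)) = (if PySem.Chars.isdigit cs[j] then some cs[j]
    else (WORDS.find? (fun wd => PySem.Chars.startswith (cs[j] :: cs.drop (j + 1)) wd.1)).map
      (fun wd => wd.2)) from rfl]
  by_cases hd : PySem.Chars.isdigit cs[j] = true
  · rw [if_pos hd]
    constructor
    · intro h; exact Or.inl ⟨hd, (Option.some_inj.mp h).symm⟩
    · rintro (⟨_, rfl⟩ | ⟨hnd, _⟩)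
      · rfl
      · rw [hd] at hnd; cases hnd
  · rw [if_neg hd]
    have hd' : PySem.Chars.isdigit cs[j] = false := by simpa using hd
    constructor
    · intro h
      rw [Option.map_eq_some_iff] at h
      obtain ⟨wd, hfind, hsnd⟩ := h
      refine Or.inr ⟨hd', wd, List.mem_of_find?_eq_some hfind, ?_, hsnd.symm⟩
      have hp : (fun wd : List Char × Char =>
          PySem.Chars.startswith (cs[j] :: cs.drop (j + 1)) wd.1) wd = true :=
        List.find?_some (p := fun wd : List Char × Char =>
          PySem.Chars.startswith (cs[j] :: cs.drop (j + 1)) wd.1) hfind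
      exact (PySem.Chars.startswith_iff _ _).mp hp
    · rintro (⟨hdig, _⟩ | ⟨_, wd, hmem, hpre, rfl⟩)
      · rw [hd'] at hdig; cases hdig
      · rw [find?_eq_some_of_unique _ _ wd hmem ((PySem.Chars.startswith_iff _ _).mpr hpre)
          (fun b hb hpb => prefix_unique hb hmem ((PySem.Chars.startswith_iff _ _).mp hpb) hpre)]
        rfl

def digitM (cs : List Char) : List (Int × Char) :=
  (PySem.List.enumerate cs 0).filter (fun p => PySem.Chars.isdigit p.2)

def occ0 (cs : List Char) (wd : List Char × Char) : List (Int × Char) :=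
  ((List.range cs.length).filter (fun j => decide (0 ≤ j) && decide (wd.1 <+: cs.drop j))).map
    (fun (j : Nat) => ((j : Int), wd.2))

lemma mem_digitM (cs : List Char) (p : Int × Char) :
    p ∈ digitM cs ↔ ∃ k, ∃ _ : k < cs.length,
      p = ((k : Int), cs[k]) ∧ PySem.Chars.isdigit cs[k] = true := by
  simp only [digitM, List.mem_filter, PySem.List.mem_enumerate_iff]
  constructor
  · rintro ⟨⟨k, hk, rfl⟩, hd⟩
    exact ⟨k, hk, by simp, by simpa using hd⟩
  · rintro ⟨k, hk, rfl, hd⟩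
    exact ⟨⟨k, hk, by simp⟩, by simpa using hd⟩

lemma mem_occ0 (cs : List Char) (wd : List Char × Char) (p : Int × Char) :
    p ∈ occ0 cs wd ↔ ∃ j, j < cs.length ∧ wd.1 <+: cs.drop j ∧ p = ((j : Int), wd.2) := by
  simp only [occ0, List.mem_map, List.mem_filter, List.mem_range, Bool.and_eq_true,
    decide_eq_true_eq]
  constructor
  · rintro ⟨j, ⟨hj, _, hpre⟩, rfl⟩
    exact ⟨j, hj, hpre, rfl⟩
  · rintro ⟨j, hj, hpre, rfl⟩
    exact ⟨j, ⟨hj, Nat.zero_le j, hpre⟩, rfl⟩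

lemma head_not_digit_of_prefix {cs : List Char} {wd : List Char × Char} {j : Nat}
    (hmem : wd ∈ WORDS) (hj : j < cs.length) (hpre : wd.1 <+: cs.drop j) :
    PySem.Chars.isdigit cs[j] = false := by
  obtain ⟨c, t', hw⟩ : ∃ c t', wd.1 = c :: t' := by
    cases hwd : wd.1 with
    | nil => exact absurd hwd (words_ne_nil wd hmem)
    | cons c t' => exact ⟨c, t', rfl⟩
  rw [hw, List.drop_eq_getElem_cons hj, List.cons_prefix_cons] at hpre
  have hd := words_head_not_digit wd hmem
  rw [hw] at hd
  simp only [List.headD_cons] at hd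
  rwa [← hpre.1]

lemma pairwise_ordMatches (cs : List Char) :
    (ordMatches cs).Pairwise (fun a b => a.1 < b.1) := by
  apply List.Pairwise.filterMap _ ?_ (List.pairwise_lt_range)
  intro a b hab x hx y hy
  simp only [Option.map_eq_some_iff] at hx hy
  obtain ⟨da, _, rfl⟩ := hx
  obtain ⟨db, _, rfl⟩ := hy
  show (a : Int) < (b : Int)
  exact_mod_cast hab

lemma mem_ordMatches (cs : List Char) (p : Int × Char) :
    p ∈ ordMatches cs ↔ ∃ j, j < cs.length ∧ p.1 = (j : Int) ∧ emit? (cs.drop j) = some p.2 := by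
  simp only [ordMatches, List.mem_filterMap, List.mem_range, Option.map_eq_some_iff]
  constructor
  · rintro ⟨j, hj, d, hd, rfl⟩
    exact ⟨j, hj, rfl, hd⟩
  · rintro ⟨j, hj, hfst, hd⟩
    exact ⟨j, hj, p.2, hd, by rw [← hfst]⟩

lemma nodup_ordMatches (cs : List Char) : (ordMatches cs).Nodup :=
  (pairwise_ordMatches cs).imp (fun h => by intro he; rw [he] at h; exact lt_irrefl _ h)

lemma nodup_digitM (cs : List Char) : (digitM cs).Nodup :=
  ((PySem.List.pairwise_lt_enumerate cs 0).sublist List.filter_sublist).imp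
    (fun h => by intro he; rw [he] at h; exact lt_irrefl _ h)

lemma nodup_occ0 (cs : List Char) (wd : List Char × Char) : (occ0 cs wd).Nodup := by
  apply List.Nodup.map
  · intro a b hab
    have h1 : (a : Int) = (b : Int) := by simpa using congrArg Prod.fst hab
    exact_mod_cast h1
  · exact List.nodup_range.filter _

lemma nodup_matches (cs : List Char) :
    (digitM cs ++ WORDS.flatMap (occ0 cs)).Nodup := by
  rw [List.nodup_append]
  refine ⟨nodup_digitM cs, ?_, ?_⟩
  · rw [List.nodup_flatMap]
    refine ⟨fun wd _ => nodup_occ0 cs wd, ?_⟩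
    refine List.Pairwise.imp_of_mem (fun {wd wd'} hmem hmem' hne => ?_) words_nodup
    intro x hx hx'
    obtain ⟨j, hj, hpre, rfl⟩ := (mem_occ0 cs wd _).mp hx
    obtain ⟨j', hj', hpre', he⟩ := (mem_occ0 cs wd' _).mp hx'
    have hjj : j = j' := by
      have h1 : ((j : Int)) = ((j' : Int)) := by simpa using congrArg Prod.fst he
      exact_mod_cast h1
    subst hjj
    exact hne (prefix_unique hmem hmem' hpre hpre')
  · intro x hx y hy
    obtain ⟨k, hk, rfl, hdig⟩ := (mem_digitM cs x).mp hx
    obtain ⟨wd, hmem, hocc⟩ := List.mem_flatMap.mp hy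
    obtain ⟨j, hj, hpre, rfl⟩ := (mem_occ0 cs wd _).mp hocc
    intro he
    have hkj : k = j := by
      have h1 : ((k : Int)) = ((j : Int)) := by simpa using congrArg Prod.fst he
      exact_mod_cast h1
    subst hkj
    rw [head_not_digit_of_prefix hmem hk hpre] at hdig
    cases hdig

lemma mem_matches_iff (cs : List Char) (p : Int × Char) :
    p ∈ ordMatches cs ↔ p ∈ digitM cs ++ WORDS.flatMap (occ0 cs) := by
  rw [List.mem_append, List.mem_flatMap, mem_ordMatches]
  constructor
  · rintro ⟨j, hj, hfst, hemit⟩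
    rcases (emit?_eq_some_iff cs j hj p.2).mp hemit with ⟨hdig, hpd⟩ | ⟨_, wd, hmem, hpre, hpd⟩
    · exact Or.inl ((mem_digitM cs p).mpr ⟨j, hj, Prod.ext hfst hpd, hdig⟩)
    · exact Or.inr ⟨wd, hmem, (mem_occ0 cs wd p).mpr ⟨j, hj, hpre, Prod.ext hfst hpd⟩⟩
  · rintro (hp | ⟨wd, hmem, hp⟩)
    · obtain ⟨k, hk, rfl, hdig⟩ := (mem_digitM cs p).mp hp
      exact ⟨k, hk, rfl, (emit?_eq_some_iff cs k hk _).mpr (Or.inl ⟨hdig, rfl⟩)⟩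
    · obtain ⟨j, hj, hpre, rfl⟩ := (mem_occ0 cs wd p).mp hp
      exact ⟨j, hj, rfl, (emit?_eq_some_iff cs j hj _).mpr
        (Or.inr ⟨head_not_digit_of_prefix hmem hj hpre, wd, hmem, hpre, rfl⟩)⟩

lemma sorted_matches (cs : List Char) :
    PySem.List.sorted (digitM cs ++ WORDS.flatMap (occ0 cs)) (fun m => m.1) false
      = ordMatches cs := by
  have hperm : (ordMatches cs).Perm (digitM cs ++ WORDS.flatMap (occ0 cs)) :=
    (List.perm_ext_iff_of_nodup (nodup_ordMatches cs) (nodup_matches cs)).mpr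
      (mem_matches_iff cs)
  exact PySem.List.sorted_eq_of_perm_of_pairwise_lt _ _ _ hperm (pairwise_ordMatches cs)

-- ===== VERDICT =====
theorem stringToNumber_spec : Claim_equal_stringToNumber := by
  intro string _
  unfold Spec_stringToNumber
  have ha : stringToNumber string
      = String.ofList ((string.toList.foldl stepA ([], string.toList)).1) := rfl
  have hb : stringToNumber_alt string
      = String.ofList ((PySem.List.sorted
          (WORDS.foldl (fun acc wd => acc ++ findLoop string.toList wd.1 wd.2
            (string.toList.length + 1) (PySem.Chars.find string.toList wd.1)) (digitM string.toList))
          (fun m => m.1) false).map (fun m => m.2)) := rfl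
  rw [ha, hb, foldA, PySem.List.foldl_append_eq_flatMap]
  have hfl : ∀ wd ∈ WORDS, findLoop string.toList wd.1 wd.2
      (string.toList.length + 1) (PySem.Chars.find string.toList wd.1) = occ0 string.toList wd := by
    intro wd hmem
    rw [← PySem.Chars.findFrom_zero, show (0 : Int) = ((0 : Nat) : Int) from rfl,
      findLoop_eq string.toList wd.1 wd.2 (words_ne_nil wd hmem) (string.toList.length + 1) 0
        (Nat.zero_le _) (by omega)]
    rfl
  rw [List.flatMap, List.map_congr_left hfl, ← List.flatMap]
  rw [sorted_matches, emitAll_eq_filterMap]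
  congr 1
  rw [ordMatches, List.map_filterMap]
  apply List.filterMap_congr
  intro j _
  cases emit? (string.toList.drop j) <;> simp
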